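-- pv_equiv track=rewrite | github.com/acdh-oeaw/apis-instance-tbf | apis_ontology/management/commands/import_translations_data.py | split_publication_details
-- ===== SOURCE A (Python) =====
-- def split_publication_details(input_string: str):
--     """
--     Split `publication_details` contents into `other_title_information` and
--     `pages`.
--
--     The TB in translation key `publication_details` may contain information
--     about issues/volumes and/or page references as values. If there is both,
--     additional title information comes first, followed by pages, separated
--     by a comma.
--
--     Issues or volumes are usually referenced via numbers and/or years and/or
--     titles. Occasionally, a full date is given.
--     Page references are always prefixed with at least one "S." for "Seiten"
--     and can be individual pages or page ranges. Multiple page references are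
--     separated from one another via slashes; typically (though not reliably),
--     subsequent page references are each individually prefixed with "S.".
--     Examples: S. 5-8 / 27-84
--               36-37, S. 209
--               337/5, S. 6-7 / S. 8-11
--               7: »Correction«, S. 107-126
--     """
--     other_title_information = None
--     pages = None
--
--     if isinstance(input_string, str):
--         combined_info = input_string.split("S.")
--         other_title_information = combined_info[0].strip(" ,")
--
--         page_refs = []
--         for page_ref in combined_info[1:]:
--             # clean up stray slashes and whitespace
--             page_ref = page_ref.strip(" /")
--             if multiple_refs := page_ref.split("/"):
--                 # page refs not prefixed with "S." need further splitting up
--                 for ref in multiple_refs: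
--                     ref = ref.strip()
--                     if ref:
--                         page_refs.append(ref)
--
--         pages = "; ".join(page_refs)
--
--     return other_title_information, pages
-- ===== SOURCE B (Python) =====
-- def split_publication_details(input_string: str):
--     """Single left-to-right character scan with an explicit accumulator:
--     copy title characters until the first "S.", then build page tokens
--     directly, flushing the current token at each "S." or "/" separator,
--     instead of A's staged split-then-nested-split passes."""
--     if not isinstance(input_string, str):
--         return None, None
--
--     n = len(input_string)
--     i = 0
--     title_chars = []
--     while i < n and not input_string.startswith("S.", i):
--         title_chars.append(input_string[i])
--         i += 1
--     title = "".join(title_chars).strip(" ,")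
--     if i >= n:
--         return title, ""
--     i += 2
--
--     page_refs = []
--     cur = []
--
--     def flush():
--         token = "".join(cur).strip()
--         if token:
--             page_refs.append(token)
--         cur.clear()
--
--     while i < n:
--         if input_string.startswith("S.", i):
--             flush()
--             i += 2
--         elif input_string[i] == "/":
--             flush()
--             i += 1
--         else:
--             cur.append(input_string[i])
--             i += 1
--     flush()
--     return title, "; ".join(page_refs)
-- ===== Notes on version B (the rewrite author's own statement) =====
-- stated objective: alternative
-- what changed: B replaces A's staged pipeline (split on 'S.', then per-piece strip and inner split on '/') by one left-to-right character scan with an explicit current-token accumulator that is flushed at each 'S.' or '/' separator, building the page-token list in a single pass.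
import Mathlib
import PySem

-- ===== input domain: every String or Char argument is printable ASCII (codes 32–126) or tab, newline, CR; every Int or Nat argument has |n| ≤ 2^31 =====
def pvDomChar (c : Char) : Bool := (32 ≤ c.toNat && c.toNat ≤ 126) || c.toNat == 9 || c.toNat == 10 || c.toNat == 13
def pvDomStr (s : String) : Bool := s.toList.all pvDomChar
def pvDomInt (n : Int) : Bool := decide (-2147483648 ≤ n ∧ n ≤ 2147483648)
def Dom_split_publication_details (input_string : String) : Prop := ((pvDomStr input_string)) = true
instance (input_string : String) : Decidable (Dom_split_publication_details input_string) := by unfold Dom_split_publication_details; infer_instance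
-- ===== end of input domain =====

-- B replaces A's staged split-then-nested-split passes by one left-to-right character scan
-- with an explicit current-token accumulator flushed at each "S." or "/" (objective: alternative).

-- ===== PORT A =====
-- literal port of A; the argument is always a str, so the isinstance branch is always taken.
-- combined_info[0] is total: split always returns at least one piece, hence headD's default is never used.
def split_publication_details (input_string : String) : Option String × Option String :=
  let combined := PySem.Chars.splitOn input_string.toList ['S', '.']
  let other_title_information := PySem.Chars.stripChars (combined.headD []) [' ', ',']
  let page_refs := (combined.drop 1).foldl (fun acc page_ref =>
      let pr := PySem.Chars.stripChars page_ref [' ', '/']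
      let multiple_refs := PySem.Chars.splitOn pr ['/']
      if multiple_refs.isEmpty then acc
      else multiple_refs.foldl (fun acc2 r =>
        let r' := PySem.Chars.strip r
        if r' ≠ [] then acc2 ++ [r'] else acc2) acc) []
  (some (String.mk other_title_information),
   some (String.mk (PySem.Chars.join [';', ' '] page_refs)))

-- ===== PORT B =====
-- Source B's first while loop: copy characters until the first "S."; returns the copied
-- title characters and (if found) the remainder after the "S.".
def pvScanTitle : List Char → List Char × Option (List Char)
  | c :: d :: t =>
      if c = 'S' ∧ d = '.' then ([], some t)
      else
        let (ti, r) := pvScanTitle (d :: t)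
        (c :: ti, r)
  | [c] => ([c], none)
  | [] => ([], none)

-- Source B's flush(): strip the current token, append it if non-empty.
def pvFlush (cur : List Char) (acc : List (List Char)) : List (List Char) :=
  let token := PySem.Chars.strip cur
  if token ≠ [] then acc ++ [token] else acc

-- Source B's second while loop plus the final flush().
def pvScanPages : List Char → List Char → List (List Char) → List (List Char)
  | c :: d :: t, cur, acc =>
      if c = 'S' ∧ d = '.' then pvScanPages t [] (pvFlush cur acc)
      else if c = '/' then pvScanPages (d :: t) [] (pvFlush cur acc)
      else pvScanPages (d :: t) (cur ++ [c]) acc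
  | [c], cur, acc =>
      -- last character: "S." cannot start here; '/' flushes, then the loop ends and
      -- the final flush sees an empty cur; otherwise the char joins cur before the final flush
      if c = '/' then pvFlush [] (pvFlush cur acc) else pvFlush (cur ++ [c]) acc
  | [], cur, acc => pvFlush cur acc

-- literal transliteration of Source B
def split_publication_details_alt (input_string : String) : Option String × Option String :=
  let scanned := pvScanTitle input_string.toList
  let title := PySem.Chars.stripChars scanned.1 [' ', ',']
  match scanned.2 with
  | none => (some (String.mk title), some "")
  | some rest =>
      (some (String.mk title),
       some (String.mk (PySem.Chars.join [';', ' '] (pvScanPages rest [] []))))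

-- ===== PRECONDITION & SPEC =====
def Spec_split_publication_details (input_string : String) (out : Option String × Option String) : Prop := out = split_publication_details_alt input_string
instance (input_string : String) (out : Option String × Option String) : Decidable (Spec_split_publication_details input_string out) := by unfold Spec_split_publication_details; infer_instance

-- ===== CLAIM (what is proved, stated in full; the proofs are below) =====
def Claim_equal_split_publication_details : Prop := ∀ (input_string : String), Dom_split_publication_details input_string → Spec_split_publication_details input_string (split_publication_details input_string)

-- ===== LEMMAS AND PROOFS =====
-- pvSplit2 / pvSplit1 are structural-recursion characterisations of PySem.Chars.splitOn
-- at the two concrete separators of A; pvIdx2 locates the first "S."; pvSplitB is the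
-- combined tokenisation B's single scan performs; pvTok is the token list of a piece.

def pvConsHead (x : List Char) : List (List Char) → List (List Char)
  | [] => [x]
  | h :: t => (x ++ h) :: t
def pvSplit2 : List Char → List (List Char)
  | c :: d :: t => if c = 'S' ∧ d = '.' then [] :: pvSplit2 t else pvConsHead [c] (pvSplit2 (d :: t))
  | [c] => [[c]]
  | [] => [[]]

def pvSplit1 : List Char → List (List Char)
  | c :: t => if c = '/' then [] :: pvSplit1 t else pvConsHead [c] (pvSplit1 t)
  | [] => [[]]

lemma pvSplit1_ne_nil (l : List Char) : pvSplit1 l ≠ [] := by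
  induction l with
  | nil => simp [pvSplit1]
  | cons c t ih =>
    simp only [pvSplit1]
    split
    · simp
    · cases h : pvSplit1 t with
      | nil => exact absurd h ih
      | cons a b => simp [pvConsHead]

lemma pvSplit2_ne_nil (l : List Char) : pvSplit2 l ≠ [] := by
  induction l using pvSplit2.induct with
  | case1 c d t h ih => simp [pvSplit2, h]
  | case2 c d t h ih =>
    simp only [pvSplit2, h, if_false]
    cases hs : pvSplit2 (d :: t) with
    | nil => exact absurd hs ih
    | cons a b => simp [pvConsHead]
  | case3 c => simp [pvSplit2]
  | case4 => simp [pvSplit2]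

lemma pvConsHead_append (x y : List Char) (z : List (List Char)) :
    pvConsHead (x ++ y) z = pvConsHead x (pvConsHead y z) := by
  cases z <;> simp [pvConsHead]

lemma splitOn_go_spec2 (fuel : Nat) (l cur : List Char) (acc : List (List Char))
    (h : l.length ≤ fuel) :
    PySem.Chars.splitOn.go ['S', '.'] fuel l cur acc
      = acc.reverse ++ pvConsHead cur.reverse (pvSplit2 l) := by
  induction fuel generalizing l cur acc with
  | zero =>
    have : l = [] := by cases l <;> simp_all
    subst this
    rw [PySem.Chars.splitOn.go.eq_def]
    simp [pvSplit2, pvConsHead]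
  | succ fuel ih =>
    match l with
    | [] =>
      rw [PySem.Chars.splitOn.go.eq_def]
      simp [pvSplit2, pvConsHead]
    | [c] =>
      rw [PySem.Chars.splitOn.go.eq_def]
      have hp : List.isPrefixOf ['S', '.'] [c] = false := by
        simp [List.isPrefixOf]
      simp only [hp, Bool.false_eq_true, if_false]
      rw [ih [] (c :: cur) acc (by simp)]
      simp [pvSplit2, pvConsHead]
    | c :: d :: t =>
      rw [PySem.Chars.splitOn.go.eq_def]
      simp only [List.length_cons] at h
      by_cases hcd : c = 'S' ∧ d = '.'
      · obtain ⟨hc, hd⟩ := hcd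
        subst hc; subst hd
        have hp : List.isPrefixOf ['S', '.'] ('S' :: '.' :: t) = true := by
          simp [List.isPrefixOf]
        simp only [hp, if_true, List.length_cons, List.length_nil, List.drop_succ_cons, List.drop_zero]
        rw [ih t [] (cur.reverse :: acc) (by omega)]
        simp only [pvSplit2, if_pos (⟨rfl, rfl⟩ : ('S':Char) = 'S' ∧ ('.':Char) = '.')]
        cases hz : pvSplit2 t with
        | nil => exact absurd hz (pvSplit2_ne_nil t)
        | cons a b => simp [pvConsHead]
      · have hp : List.isPrefixOf ['S', '.'] (c :: d :: t) = false := by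
          simp [List.isPrefixOf]
          intro hc hd; exact hcd ⟨hc.symm, hd.symm⟩
        simp only [hp, Bool.false_eq_true, if_false]
        rw [ih (d :: t) (c :: cur) acc (by simp; omega)]
        simp only [pvSplit2, if_neg hcd]
        rw [List.reverse_cons, pvConsHead_append]

lemma splitOn_eq_pvSplit2 (l : List Char) :
    PySem.Chars.splitOn l ['S', '.'] = pvSplit2 l := by
  rw [PySem.Chars.splitOn, splitOn_go_spec2 (l.length + 1) l [] [] (by omega)]
  cases hz : pvSplit2 l with
  | nil => exact absurd hz (pvSplit2_ne_nil l)
  | cons a b => simp [pvConsHead]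

lemma splitOn_go_spec1 (fuel : Nat) (l cur : List Char) (acc : List (List Char))
    (h : l.length ≤ fuel) :
    PySem.Chars.splitOn.go ['/'] fuel l cur acc
      = acc.reverse ++ pvConsHead cur.reverse (pvSplit1 l) := by
  induction fuel generalizing l cur acc with
  | zero =>
    have : l = [] := by cases l <;> simp_all
    subst this
    rw [PySem.Chars.splitOn.go.eq_def]
    simp [pvSplit1, pvConsHead]
  | succ fuel ih =>
    match l with
    | [] =>
      rw [PySem.Chars.splitOn.go.eq_def]
      simp [pvSplit1, pvConsHead]
    | c :: t =>
      rw [PySem.Chars.splitOn.go.eq_def]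
      simp only [List.length_cons] at h
      by_cases hc : c = '/'
      · subst hc
        have hp : List.isPrefixOf ['/'] ('/' :: t) = true := by simp [List.isPrefixOf]
        simp only [hp, if_true, List.length_cons, List.length_nil, List.drop_succ_cons,
          List.drop_zero]
        rw [ih t [] (cur.reverse :: acc) (by omega)]
        simp only [pvSplit1, if_pos rfl]
        cases hz : pvSplit1 t with
        | nil => exact absurd hz (pvSplit1_ne_nil t)
        | cons a b => simp [pvConsHead]
      · have hp : List.isPrefixOf ['/'] (c :: t) = false := by
          simp [List.isPrefixOf]
          exact fun h => hc h.symm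
        simp only [hp, Bool.false_eq_true, if_false]
        rw [ih t (c :: cur) acc (by omega)]
        simp only [pvSplit1, if_neg hc]
        rw [List.reverse_cons, pvConsHead_append]

lemma splitOn_eq_pvSplit1 (l : List Char) :
    PySem.Chars.splitOn l ['/'] = pvSplit1 l := by
  rw [PySem.Chars.splitOn, splitOn_go_spec1 (l.length + 1) l [] [] (by omega)]
  cases hz : pvSplit1 l with
  | nil => exact absurd hz (pvSplit1_ne_nil l)
  | cons a b => simp [pvConsHead]

def pvRepl2 : List Char → List Char
  | c :: d :: t => if c = 'S' ∧ d = '.' then '/' :: pvRepl2 t else c :: pvRepl2 (d :: t)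
  | l => l

def pvIdx2 : List Char → Option Nat
  | c :: d :: t => if c = 'S' ∧ d = '.' then some 0 else (pvIdx2 (d :: t)).map (· + 1)
  | _ => none

lemma pvConsHead_append_left (x : List Char) (u v : List (List Char)) (hu : u ≠ []) :
    pvConsHead x (u ++ v) = pvConsHead x u ++ v := by
  cases u with
  | nil => exact absurd rfl hu
  | cons a b => simp [pvConsHead]

lemma pvSplit2_of_idx_none (l : List Char) (h : pvIdx2 l = none) :
    pvSplit2 l = [l] := by
  induction l using pvSplit2.induct with
  | case1 c d t hcd ih => simp [pvIdx2, hcd] at h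
  | case2 c d t hcd ih =>
    simp only [pvIdx2, hcd, if_false, Option.map_eq_none_iff] at h
    rw [pvSplit2, if_neg hcd, ih h]
    simp [pvConsHead]
  | case3 c => simp [pvSplit2]
  | case4 => simp [pvSplit2]

lemma pvSplit2_of_idx_some (l : List Char) (n : Nat) (h : pvIdx2 l = some n) :
    pvSplit2 l = l.take n :: pvSplit2 (l.drop (n + 2)) := by
  induction l using pvSplit2.induct generalizing n with
  | case1 c d t hcd ih =>
    obtain ⟨hc, hd⟩ := hcd
    subst hc; subst hd
    simp only [pvIdx2, and_self, if_pos trivial, reduceCtorEq, Option.some.injEq] at h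
    subst h
    rw [pvSplit2, if_pos ⟨rfl, rfl⟩]
    simp
  | case2 c d t hcd ih =>
    simp only [pvIdx2, hcd, if_false, Option.map_eq_some_iff] at h
    obtain ⟨m, hm, rfl⟩ := h
    rw [pvSplit2, if_neg hcd, ih m hm]
    simp [pvConsHead, List.take_succ_cons, List.drop_succ_cons]
  | case3 c => simp [pvIdx2] at h
  | case4 => simp [pvIdx2] at h

lemma pvSplit1_cons (c : Char) (t : List Char) :
    pvSplit1 (c :: t) = if c = '/' then [] :: pvSplit1 t else pvConsHead [c] (pvSplit1 t) := rfl

lemma pvSplit1_append_sep (x y : List Char) :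
    pvSplit1 (x ++ '/' :: y) = pvSplit1 x ++ pvSplit1 y := by
  induction x with
  | nil => simp [pvSplit1]
  | cons c x' ih =>
    by_cases hc : c = '/'
    · subst hc
      simp only [List.cons_append, pvSplit1, if_pos rfl, ih]
      simp
    · simp only [List.cons_append, pvSplit1, if_neg hc, ih]
      rw [pvConsHead_append_left _ _ _ (pvSplit1_ne_nil x')]

lemma pvSplit1_repl2 (l : List Char) :
    pvSplit1 (pvRepl2 l) = (pvSplit2 l).flatMap pvSplit1 := by
  induction l using pvSplit2.induct with
  | case1 c d t hcd ih =>
    obtain ⟨hc, hd⟩ := hcd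
    subst hc; subst hd
    rw [pvRepl2, if_pos ⟨rfl, rfl⟩, pvSplit2, if_pos ⟨rfl, rfl⟩]
    simp only [List.flatMap_cons]
    rw [pvSplit1, if_pos rfl, ih]
    simp [pvSplit1]
  | case2 c d t hcd ih =>
    rw [pvRepl2, if_neg hcd, pvSplit2, if_neg hcd]
    cases hz : pvSplit2 (d :: t) with
    | nil => exact absurd hz (pvSplit2_ne_nil (d :: t))
    | cons p ps =>
      rw [hz] at ih
      by_cases hc : c = '/'
      · subst hc
        rw [pvSplit1_cons, if_pos rfl, ih]
        cases hz' : pvSplit1 p with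
        | nil => exact absurd hz' (pvSplit1_ne_nil p)
        | cons a b =>
          simp [pvConsHead, pvSplit1, hz']
      · rw [pvSplit1_cons, if_neg hc, ih]
        simp only [List.flatMap_cons, pvConsHead_append_left _ _ _ (pvSplit1_ne_nil p)]
        congr 1
        rw [List.singleton_append, pvSplit1_cons, if_neg hc]
  | case3 c => simp [pvRepl2, pvSplit2, pvConsHead, pvSplit1]
  | case4 => simp [pvRepl2, pvSplit2, pvSplit1]

def pvPageChar (c : Char) : Bool := c == ' ' || c == '/'

def pvTok (q : List Char) : List (List Char) :=
  ((pvSplit1 q).map PySem.Chars.strip).filter (· ≠ [])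

lemma isspace_space : PySem.Chars.isspace ' ' = true := by decide

lemma strip_cons_space (t : List Char) :
    PySem.Chars.strip (' ' :: t) = PySem.Chars.strip t := by
  simp [PySem.Chars.strip, PySem.Chars.lstrip, List.dropWhile_cons, isspace_space]

lemma rstrip_append_space (x : List Char) :
    PySem.Chars.rstrip (x ++ [' ']) = PySem.Chars.rstrip x := by
  simp [PySem.Chars.rstrip, List.dropWhile_cons, isspace_space]

lemma strip_append_space (t : List Char) :
    PySem.Chars.strip (t ++ [' ']) = PySem.Chars.strip t := by
  simp only [PySem.Chars.strip, PySem.Chars.lstrip, List.dropWhile_append]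
  by_cases h : (List.dropWhile PySem.Chars.isspace t).isEmpty
  · have h' : List.dropWhile PySem.Chars.isspace t = [] := by
      rwa [List.isEmpty_iff] at h
    simp [h, h', List.dropWhile_cons, isspace_space, PySem.Chars.rstrip]
  · simp only [h, if_false, Bool.false_eq_true]
    exact rstrip_append_space _

lemma strip_nil : PySem.Chars.strip [] = [] := rfl

lemma pvTok_cons_page (c : Char) (q : List Char) (hc : pvPageChar c = true) :
    pvTok (c :: q) = pvTok q := by
  have : c = ' ' ∨ c = '/' := by
    simp [pvPageChar] at hc
    rcases hc with h | h
    · left; exact h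
    · right; exact h
  rcases this with rfl | rfl
  · rw [pvTok, pvSplit1_cons, if_neg (by decide : ¬ (' ' = '/'))]
    cases hz : pvSplit1 q with
    | nil => exact absurd hz (pvSplit1_ne_nil q)
    | cons p ps =>
      simp only [pvConsHead, List.map_cons, List.singleton_append, strip_cons_space]
      rw [pvTok, hz, List.map_cons]
  · rw [pvTok, pvSplit1_cons, if_pos rfl]
    simp [pvTok, strip_nil]

def pvMapLast (f : List Char → List Char) : List (List Char) → List (List Char)
  | [] => []
  | [a] => [f a]
  | a :: b :: t => a :: pvMapLast f (b :: t)

lemma pvSplit1_append_nonsep (c : Char) (hc : ¬ c = '/') (x : List Char) :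
    pvSplit1 (x ++ [c]) = pvMapLast (· ++ [c]) (pvSplit1 x) := by
  induction x with
  | nil =>
    simp only [List.nil_append, pvSplit1, if_neg hc]
    simp [pvConsHead, pvMapLast]
  | cons a x' ih =>
    by_cases ha : a = '/'
    · subst ha
      rw [List.cons_append, pvSplit1_cons, if_pos rfl, ih, pvSplit1_cons, if_pos rfl]
      cases hz : pvSplit1 x' with
      | nil => exact absurd hz (pvSplit1_ne_nil x')
      | cons p ps => simp [pvMapLast]
    · rw [List.cons_append, pvSplit1_cons, if_neg ha, ih, pvSplit1_cons, if_neg ha]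
      cases hz : pvSplit1 x' with
      | nil => exact absurd hz (pvSplit1_ne_nil x')
      | cons p ps =>
        cases ps with
        | nil => simp [pvMapLast, pvConsHead]
        | cons b bs => simp [pvMapLast, pvConsHead]

lemma map_strip_pvMapLast (z : List (List Char)) :
    (pvMapLast (· ++ [' ']) z).map PySem.Chars.strip = z.map PySem.Chars.strip := by
  induction z using pvMapLast.induct with
  | case1 => simp [pvMapLast]
  | case2 a => simp [pvMapLast, strip_append_space]
  | case3 a b t ih => simp only [pvMapLast, List.map_cons, ih]

lemma pvTok_append_space (x : List Char) : pvTok (x ++ [' ']) = pvTok x := by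
  rw [pvTok, pvSplit1_append_nonsep ' ' (by decide) x, map_strip_pvMapLast, pvTok]

lemma pvTok_append_slash (x : List Char) : pvTok (x ++ ['/']) = pvTok x := by
  have : x ++ ['/'] = x ++ '/' :: [] := rfl
  rw [pvTok, this, pvSplit1_append_sep]
  simp [pvSplit1, strip_nil, pvTok]

lemma pvTok_append_of_all (x r : List Char) (h : ∀ c ∈ r, pvPageChar c = true) :
    pvTok (x ++ r) = pvTok x := by
  induction r using List.reverseRecOn generalizing x with
  | nil => simp
  | append_singleton r' c ih =>
    have hc : pvPageChar c = true := h c (by simp)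
    have hc' : c = ' ' ∨ c = '/' := by
      simp [pvPageChar] at hc
      rcases hc with h1 | h1
      · left; exact h1
      · right; exact h1
    rw [← List.append_assoc]
    rcases hc' with rfl | rfl
    · rw [pvTok_append_space, ih x (fun c hc => h c (by simp [hc]))]
    · rw [pvTok_append_slash, ih x (fun c hc => h c (by simp [hc]))]

lemma pvTok_dropWhile (q : List Char) :
    pvTok (List.dropWhile pvPageChar q) = pvTok q := by
  induction q with
  | nil => rfl
  | cons c q' ih =>
    cases hpc : pvPageChar c with
    | false => simp [List.dropWhile_cons, hpc]
    | true =>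
      rw [List.dropWhile_cons_of_pos hpc, ih]
      exact (pvTok_cons_page c q' hpc).symm

lemma contains_eq_pvPageChar :
    (fun c => List.contains [' ', '/'] c) = pvPageChar := by
  funext c
  simp only [List.contains_cons, List.contains_nil, Bool.or_false, pvPageChar]

lemma pvTok_stripChars (q : List Char) :
    pvTok (PySem.Chars.stripChars q [' ', '/']) = pvTok q := by
  rw [PySem.Chars.stripChars]
  simp only [contains_eq_pvPageChar]
  set u := List.dropWhile pvPageChar q with hu
  have hdecomp : u = (List.dropWhile pvPageChar u.reverse).reverse
      ++ (List.takeWhile pvPageChar u.reverse).reverse := by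
    conv_lhs => rw [← List.reverse_reverse u, ← List.takeWhile_append_dropWhile
      (p := pvPageChar) (l := u.reverse)]
    rw [List.reverse_append]
  have hall : ∀ c ∈ (List.takeWhile pvPageChar u.reverse).reverse, pvPageChar c = true := by
    intro c hcmem
    rw [List.mem_reverse] at hcmem
    exact List.mem_takeWhile_imp hcmem
  calc pvTok (List.dropWhile pvPageChar u.reverse).reverse
      = pvTok ((List.dropWhile pvPageChar u.reverse).reverse
          ++ (List.takeWhile pvPageChar u.reverse).reverse) :=
        (pvTok_append_of_all _ _ hall).symm
    _ = pvTok u := by rw [← hdecomp]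
    _ = pvTok q := pvTok_dropWhile q

lemma inner_fold (m : List (List Char)) (acc : List (List Char)) :
    m.foldl (fun acc2 r =>
      let r' := PySem.Chars.strip r
      if r' ≠ [] then acc2 ++ [r'] else acc2) acc
      = acc ++ (m.map PySem.Chars.strip).filter (· ≠ []) := by
  induction m generalizing acc with
  | nil => simp
  | cons r m' ih =>
    rw [List.foldl_cons, ih]
    simp only [List.map_cons, List.filter_cons]
    by_cases h : PySem.Chars.strip r ≠ []
    · simp [h]
    · simp only [ne_eq, not_not] at h
      simp [h]

lemma outer_fold (pieces : List (List Char)) (acc : List (List Char)) :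
    pieces.foldl (fun acc page_ref =>
      let pr := PySem.Chars.stripChars page_ref [' ', '/']
      let multiple_refs := PySem.Chars.splitOn pr ['/']
      if multiple_refs.isEmpty then acc
      else multiple_refs.foldl (fun acc2 r =>
        let r' := PySem.Chars.strip r
        if r' ≠ [] then acc2 ++ [r'] else acc2) acc) acc
      = acc ++ pieces.flatMap (fun p => pvTok (PySem.Chars.stripChars p [' ', '/'])) := by
  induction pieces generalizing acc with
  | nil => simp
  | cons p t ih =>
    rw [List.foldl_cons, ih]
    dsimp only
    rw [splitOn_eq_pvSplit1]
    have h1 : (pvSplit1 (PySem.Chars.stripChars p [' ', '/'])).isEmpty = false := by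
      simp [List.isEmpty_iff, pvSplit1_ne_nil]
    rw [h1]
    simp only [Bool.false_eq_true, if_false]
    rw [inner_fold]
    simp [pvTok, List.append_assoc]

lemma flat_tok (ps : List (List Char)) :
    ((ps.flatMap pvSplit1).map PySem.Chars.strip).filter (· ≠ []) = ps.flatMap pvTok := by
  induction ps with
  | nil => simp
  | cons p t ih =>
    simp only [List.flatMap_cons, List.map_append, List.filter_append, ih, pvTok]

-- B-side characterisations ---------------------------------------------------

lemma pvScanTitle_of_idx_none (l : List Char) (h : pvIdx2 l = none) :
    pvScanTitle l = (l, none) := by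
  induction l using pvScanTitle.induct with
  | case1 c d t hcd => simp [pvIdx2, hcd] at h
  | case2 c d t hcd ti r hscan ih =>
    simp only [pvIdx2, hcd, if_false, Option.map_eq_none_iff] at h
    rw [pvScanTitle, if_neg hcd]
    have := ih h
    rw [hscan] at this
    simp_all
  | case3 c => simp [pvScanTitle]
  | case4 => simp [pvScanTitle]

lemma pvScanTitle_of_idx_some (l : List Char) (n : Nat) (h : pvIdx2 l = some n) :
    pvScanTitle l = (l.take n, some (l.drop (n + 2))) := by
  induction l using pvScanTitle.induct generalizing n with
  | case1 c d t hcd =>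
    obtain ⟨hc, hd⟩ := hcd
    subst hc; subst hd
    simp only [pvIdx2, and_self, if_pos trivial, Option.some.injEq] at h
    subst h
    rw [pvScanTitle, if_pos ⟨rfl, rfl⟩]
    simp
  | case2 c d t hcd ti r hscan ih =>
    simp only [pvIdx2, hcd, if_false, Option.map_eq_some_iff] at h
    obtain ⟨m, hm, rfl⟩ := h
    rw [pvScanTitle, if_neg hcd]
    have := ih m hm
    rw [hscan] at this
    simp only [Prod.mk.injEq] at this
    obtain ⟨h1, h2⟩ := this
    simp [hscan, h1, h2, List.take_succ_cons, List.drop_succ_cons]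
  | case3 c => simp [pvIdx2] at h
  | case4 => simp [pvIdx2] at h

-- B's combined tokenisation: split on both "S." and "/".
def pvSplitB : List Char → List (List Char)
  | c :: d :: t =>
      if c = 'S' ∧ d = '.' then [] :: pvSplitB t
      else if c = '/' then [] :: pvSplitB (d :: t)
      else pvConsHead [c] (pvSplitB (d :: t))
  | [c] => if c = '/' then [[], []] else [[c]]
  | [] => [[]]

lemma pvSplitB_ne_nil (l : List Char) : pvSplitB l ≠ [] := by
  induction l using pvSplitB.induct with
  | case1 c d t h ih => simp [pvSplitB, h]
  | case2 d t h ih => simp [pvSplitB, h]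
  | case3 c d t h h2 ih =>
    simp only [pvSplitB, h, h2, if_false]
    cases hs : pvSplitB (d :: t) with
    | nil => exact absurd hs ih
    | cons a b => simp [pvConsHead]
  | case4 => simp [pvSplitB]
  | case5 c hc => simp [pvSplitB, hc]
  | case6 => simp [pvSplitB]

lemma pvSplitB_eq (l : List Char) : pvSplitB l = pvSplit1 (pvRepl2 l) := by
  induction l using pvSplitB.induct with
  | case1 c d t hcd ih =>
    obtain ⟨hc, hd⟩ := hcd
    subst hc; subst hd
    rw [pvSplitB, if_pos ⟨rfl, rfl⟩, pvRepl2, if_pos ⟨rfl, rfl⟩, pvSplit1_cons, if_pos rfl, ih]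
  | case2 d t hcd ih =>
    rw [pvSplitB, if_neg hcd, if_pos rfl, pvRepl2, if_neg hcd, pvSplit1_cons, if_pos rfl, ih]
  | case3 c d t hcd hc ih =>
    rw [pvSplitB, if_neg hcd, if_neg hc, pvRepl2, if_neg hcd, pvSplit1_cons, if_neg hc, ih]
  | case4 =>
    rw [pvSplitB, if_pos rfl]
    simp [pvRepl2, pvSplit1]
  | case5 c hc =>
    rw [pvSplitB, if_neg hc]
    simp [pvRepl2, pvSplit1_cons, if_neg hc, pvSplit1, pvConsHead]
  | case6 => simp [pvRepl2, pvSplit1, pvSplitB]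

lemma pvFlush_filter (cur : List Char) (acc z : List (List Char)) :
    acc ++ ((cur :: z).map PySem.Chars.strip).filter (· ≠ [])
      = pvFlush cur acc ++ (z.map PySem.Chars.strip).filter (· ≠ []) := by
  simp only [List.map_cons, List.filter_cons, pvFlush]
  by_cases h : PySem.Chars.strip cur ≠ []
  · simp [h]
  · simp only [ne_eq, not_not] at h
    simp [h]

lemma pvScanPages_spec (l cur : List Char) (acc : List (List Char)) :
    pvScanPages l cur acc
      = acc ++ ((pvConsHead cur (pvSplitB l)).map PySem.Chars.strip).filter (· ≠ []) := by
  induction l using pvSplitB.induct generalizing cur acc with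
  | case1 c d t hcd ih =>
    obtain ⟨hc, hd⟩ := hcd
    subst hc; subst hd
    rw [pvScanPages, if_pos ⟨rfl, rfl⟩, ih, pvSplitB, if_pos ⟨rfl, rfl⟩]
    cases hz : pvSplitB t with
    | nil => exact absurd hz (pvSplitB_ne_nil t)
    | cons a b =>
      simp only [pvConsHead, List.append_nil, List.nil_append]
      exact (pvFlush_filter cur acc (a :: b)).symm
  | case2 d t hcd ih =>
    rw [pvScanPages, if_neg hcd, if_pos rfl, ih, pvSplitB, if_neg hcd, if_pos rfl]
    cases hz : pvSplitB (d :: t) with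
    | nil => exact absurd hz (pvSplitB_ne_nil (d :: t))
    | cons a b =>
      simp only [pvConsHead, List.append_nil, List.nil_append]
      exact (pvFlush_filter cur acc (a :: b)).symm
  | case3 c d t hcd hc ih =>
    rw [pvScanPages, if_neg hcd, if_neg hc, ih, pvSplitB, if_neg hcd, if_neg hc,
      ← pvConsHead_append]
  | case4 =>
    rw [pvScanPages, if_pos rfl, pvSplitB, if_pos rfl]
    simp only [pvConsHead, List.append_nil]
    rw [pvFlush_filter cur acc [[]]]
    simp [pvFlush, strip_nil]
  | case5 c hc =>
    rw [pvScanPages, if_neg hc, pvSplitB, if_neg hc]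
    simp only [pvConsHead]
    rw [pvFlush_filter (cur ++ [c]) acc []]
    simp
  | case6 =>
    rw [pvScanPages]
    simp only [pvSplitB, pvConsHead, List.append_nil]
    rw [pvFlush_filter cur acc []]
    simp

theorem main_equiv (s : String) :
    split_publication_details s = split_publication_details_alt s := by
  unfold split_publication_details split_publication_details_alt
  cases hidx : pvIdx2 s.toList with
  | none =>
    rw [splitOn_eq_pvSplit2, pvSplit2_of_idx_none _ hidx, pvScanTitle_of_idx_none _ hidx]
    simp only [List.headD_cons, List.drop_succ_cons, List.drop_zero, List.foldl_nil]
    have hmk : String.mk (PySem.Chars.join [';', ' '] []) = "" := by decide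
    rw [hmk]
  | some n =>
    rw [splitOn_eq_pvSplit2, pvSplit2_of_idx_some _ n hidx, pvScanTitle_of_idx_some _ n hidx]
    simp only [List.headD_cons, List.drop_succ_cons, List.drop_zero]
    rw [outer_fold, pvScanPages_spec]
    have hB : ((pvConsHead [] (pvSplitB (s.toList.drop (n + 2)))).map PySem.Chars.strip).filter
        (· ≠ []) = (pvSplit2 (s.toList.drop (n + 2))).flatMap pvTok := by
      cases hz : pvSplitB (s.toList.drop (n + 2)) with
      | nil => exact absurd hz (pvSplitB_ne_nil _)
      | cons a b =>
        have : pvConsHead [] (a :: b) = a :: b := by simp [pvConsHead]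
        rw [this, ← hz, pvSplitB_eq, pvSplit1_repl2, flat_tok]
    rw [hB]
    simp only [pvTok_stripChars, List.nil_append]

-- ===== VERDICT (by name: the statement is the Claim_ definition above) =====
theorem split_publication_details_spec : Claim_equal_split_publication_details := by
  intro s _
  unfold Spec_split_publication_details
  exact main_equiv s
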